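-- pv_equiv track=rewrite | github.com/rlacodls3109/codetree-TILs | 240726/2개 이상의 알파벳/more-than-one-alphabet.py | answer
-- ===== SOURCE A (Python) =====
-- def answer(string):
--     cnt = 0
--     for i in range(len(string)-1):
--         for j in range(i+1,len(string)):
--             if string[i] != string[j]:
--                 cnt += 1
--         if cnt >= 2:
--             return True
--     return False
-- ===== SOURCE B (Python) =====
-- def answer(string):
--     # A string has at least 2 cumulative unequal pairs iff it has length >= 3
--     # and contains at least 2 distinct characters.
--     return len(string) >= 3 and len(set(string)) >= 2
-- ===== Notes on version B (the rewrite author's own statement) =====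
-- stated objective: faster
-- what changed: Replaced the nested pair-counting loops with a closed-form test: the unequal-pair count reaches 2 exactly when the string has length >= 3 and at least 2 distinct characters, computed in one pass over the string.
import Mathlib
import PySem

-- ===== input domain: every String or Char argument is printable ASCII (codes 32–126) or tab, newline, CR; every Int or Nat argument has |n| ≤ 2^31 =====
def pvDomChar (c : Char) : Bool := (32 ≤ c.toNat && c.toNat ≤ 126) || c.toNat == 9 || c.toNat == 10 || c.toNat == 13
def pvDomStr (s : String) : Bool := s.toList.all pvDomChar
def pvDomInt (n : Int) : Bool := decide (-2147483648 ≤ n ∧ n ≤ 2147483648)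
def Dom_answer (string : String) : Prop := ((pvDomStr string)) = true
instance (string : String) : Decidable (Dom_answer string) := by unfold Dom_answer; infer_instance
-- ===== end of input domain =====

-- B replaces A's quadratic nested pair-counting loops by a closed-form test
-- (length >= 3 and at least 2 distinct characters), one pass over the string.

-- ===== PORT A =====
-- inner loop: for j in range(i+1, len(string)): if string[i] != string[j]: cnt += 1
def answerInner (s : List Char) (i : Int) (js : List Int) (cnt : Int) : Int :=
  match js with
  | [] => cnt
  | j :: rest =>
      answerInner s i rest
        (if PySem.List.pyGet? s i ≠ PySem.List.pyGet? s j then cnt + 1 else cnt)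

-- outer loop over i in range(len(string)-1), with the early `return True` when cnt >= 2
def answerOuter (s : List Char) (n : Int) (is_ : List Int) (cnt : Int) : Bool :=
  match is_ with
  | [] => false
  | i :: rest =>
      let cnt' := answerInner s i (PySem.List.pyRange (i + 1) n 1) cnt
      if 2 ≤ cnt' then true else answerOuter s n rest cnt'

def answer (string : String) : Bool :=
  let s := string.toList
  answerOuter s ((s.length : Int)) (PySem.List.pyRange 0 ((s.length : Int) - 1) 1) 0

-- ===== PORT B =====
-- return len(string) >= 3 and len(set(string)) >= 2
def answer_alt (string : String) : Bool :=
  decide (3 ≤ PySem.Str.len string) &&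
  decide (2 ≤ PySem.Set.len (PySem.Set.ofList string.toList))

-- ===== PRECONDITION & SPEC =====
def Spec_answer (string : String) (out : Bool) : Prop := out = answer_alt string
instance (string : String) (out : Bool) : Decidable (Spec_answer string out) := by unfold Spec_answer; infer_instance

-- ===== CLAIM (what is proved, stated in full; the proofs are below) =====
def Claim_equal_answer : Prop := ∀ (string : String), Dom_answer string → Spec_answer string (answer string)

-- ===== LEMMAS AND PROOFS =====

-- total number of unequal index pairs (i < j), counted row by row — what A's cnt totals
def tot : List Char → Nat
  | [] => 0
  | a :: t => t.countP (fun b => decide (b ≠ a)) + tot t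

theorem answerInner_eq_countP (s : List Char) (i : Int) (js : List Int) (cnt : Int) :
    answerInner s i js cnt
      = cnt + (js.countP (fun j => decide (PySem.List.pyGet? s i ≠ PySem.List.pyGet? s j)) : Int) := by
  induction js generalizing cnt with
  | nil => simp [answerInner]
  | cons j rest ih =>
      simp only [answerInner, ih, List.countP_cons]
      by_cases h : PySem.List.pyGet? s i ≠ PySem.List.pyGet? s j
      · rw [if_pos h, decide_eq_true h]
        simp only [if_true]; push_cast; ring
      · rw [if_neg h, decide_eq_false h]
        simp only [Bool.false_eq_true, if_false]; push_cast; ring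

theorem answerInner_drop (s : List Char) (k : Nat) (cnt : Int) (hk : k < s.length) :
    answerInner s (k : Int) (PySem.List.pyRange ((k : Int) + 1) ((s.length : Int)) 1) cnt
      = cnt + ((s.drop (k+1)).countP (fun b => decide (b ≠ s[k])) : Int) := by
  rw [answerInner_eq_countP]
  congr 1
  have hmap : (PySem.List.pyRange ((k:Int)+1) ((s.length : Int)) 1).map
      (fun j => PySem.List.pyGetD s j 'x') = s.drop (((k:Int)+1)).toNat :=
    PySem.List.map_pyGetD_pyRange' s 'x' (by omega : (0:Int) ≤ (k:Int)+1)
  have htoNat : (((k:Int)+1)).toNat = k + 1 := by omega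
  rw [htoNat] at hmap
  rw [← hmap, List.countP_map]
  norm_cast
  apply List.countP_congr
  intro j hj
  have hjb := PySem.List.mem_pyRange_one.mp hj
  have h0j : 0 ≤ j := by omega
  have hjlen' : j < ((s.length : Int)) := by exact_mod_cast hjb.2
  have hgk : PySem.List.pyGet? s (k : Int) = some s[k] := by
    rw [PySem.List.pyGet?_natCast]; simp [hk]
  have hgj : PySem.List.pyGet? s j = some s[j.toNat] :=
    PySem.List.pyGet?_eq_some_getElem s h0j hjlen'
  have hgd : PySem.List.pyGetD s j 'x' = s[j.toNat] :=
    PySem.List.pyGetD_eq_getElem s 'x' h0j hjlen'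
  simp [Function.comp, hgk, hgj, hgd, ne_comm]

theorem tot_small (s : List Char) (h : s.length ≤ 1) : tot s = 0 := by
  match s, h with
  | [], _ => rfl
  | [a], _ => simp [tot]

theorem tot_eq_zero_of_all_eq (s : List Char) (h : ∀ a ∈ s, ∀ b ∈ s, a = b) : tot s = 0 := by
  induction s with
  | nil => rfl
  | cons a t ih =>
      have h1 : t.countP (fun b => decide (b ≠ a)) = 0 :=
        List.countP_eq_zero.mpr (by
          intro x hx
          simpa using h x (List.mem_cons_of_mem a hx) a List.mem_cons_self)
      have h2 : tot t = 0 :=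
        ih (fun x hx y hy => h x (List.mem_cons_of_mem a hx) y (List.mem_cons_of_mem a hy))
      simp only [tot, h1, h2]

theorem all_eq_of_tot_eq_zero (s : List Char) (h : tot s = 0) :
    ∀ a ∈ s, ∀ b ∈ s, a = b := by
  induction s with
  | nil => intro a ha; simp at ha
  | cons c t ih =>
      simp only [tot, Nat.add_eq_zero_iff] at h
      have hall : ∀ x ∈ t, x = c := by
        intro x hx
        simpa using List.countP_eq_zero.mp h.1 x hx
      intro a ha b hb
      rcases List.mem_cons.mp ha with h' | h' <;> rcases List.mem_cons.mp hb with h'' | h''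
      · exact h'.trans h''.symm
      · exact h'.trans (hall b h'').symm
      · exact (hall a h').trans h''.symm
      · exact ih h.2 a h' b h''

theorem tot_pos (s : List Char) (a b : Char) (ha : a ∈ s) (hb : b ∈ s) (hab : a ≠ b) :
    1 ≤ tot s := by
  by_contra h
  exact hab (all_eq_of_tot_eq_zero s (by omega) a ha b hb)

theorem exists_ne_of_tot_pos (s : List Char) (h : 1 ≤ tot s) :
    ∃ a ∈ s, ∃ b ∈ s, a ≠ b := by
  by_contra hc
  push_neg at hc
  rw [tot_eq_zero_of_all_eq s hc] at h
  omega

theorem two_le_tot (s : List Char) (hlen : 3 ≤ s.length)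
    (hne : ∃ a ∈ s, ∃ b ∈ s, a ≠ b) : 2 ≤ tot s := by
  obtain ⟨a, ha, b, hb, hab⟩ := hne
  match s, hlen, ha, hb with
  | c :: t, hlen, ha, hb =>
    have hlt : 2 ≤ t.length := by simpa using hlen
    have hkle : t.countP (fun x => decide (x ≠ c)) ≤ t.length := List.countP_le_length
    rcases Nat.lt_or_ge (t.countP (fun x => decide (x ≠ c))) 2 with hk2 | hk2
    · rcases Nat.eq_zero_or_pos (t.countP (fun x => decide (x ≠ c))) with hk0 | hk1
      · -- every character equals c: contradicts a ≠ b
        have hall : ∀ x ∈ t, x = c := by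
          intro x hx
          simpa using List.countP_eq_zero.mp hk0 x hx
        have hac : a = c := by
          rcases List.mem_cons.mp ha with h' | h'
          · exact h'
          · exact hall a h'
        have hbc : b = c := by
          rcases List.mem_cons.mp hb with h' | h'
          · exact h'
          · exact hall b h'
        exact absurd (hac.trans hbc.symm) hab
      · -- exactly one mismatch against c in t: t itself still holds a distinct pair
        have hy : ∃ y ∈ t, (y ≠ c) := by
          have := List.countP_pos_iff.mp hk1
          simpa using this
        have hx : ∃ x ∈ t, x = c := by
          by_contra hcx
          push_neg at hcx
          have : t.countP (fun x => decide (x ≠ c)) = t.length := by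
            rw [List.countP_eq_length]
            intro x hxm; simpa using hcx x hxm
          omega
        obtain ⟨y, hym, hyc⟩ := hy
        obtain ⟨x, hxm, hxc⟩ := hx
        have ht : 1 ≤ tot t := tot_pos t y x hym hxm (by simp [hxc, hyc])
        simp only [tot]
        omega
    · simp only [tot]; omega

theorem tot_lt_two_of_short (s : List Char) (h : s.length < 3) : tot s ≤ 1 := by
  match s, h with
  | [], _ => simp [tot]
  | [a], _ => simp [tot]
  | [a, b], _ =>
      simp only [tot, List.countP_cons, List.countP_nil]
      split_ifs <;> omega

theorem answerOuter_spec_aux (m : Nat) : ∀ (s : List Char) (k : Nat) (cnt : Int),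
    s.length - k ≤ m → cnt < 2 →
    answerOuter s ((s.length : Int)) (PySem.List.pyRange (k : Int) ((s.length : Int) - 1) 1) cnt
      = decide (2 ≤ cnt + (tot (s.drop k) : Int)) := by
  induction m with
  | zero =>
      intro s k cnt hm hcnt
      have hend : ((s.length : Int)) - 1 ≤ (k : Int) := by omega
      rw [PySem.List.pyRange_one_eq_nil hend]
      have h0 : tot (s.drop k) = 0 := tot_small _ (by simp; omega)
      rw [h0]
      simp [answerOuter]
      omega
  | succ m ih =>
      intro s k cnt hm hcnt
      by_cases hend : ((s.length : Int)) - 1 ≤ (k : Int)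
      · rw [PySem.List.pyRange_one_eq_nil hend]
        have h0 : tot (s.drop k) = 0 := tot_small _ (by simp; omega)
        rw [h0]
        simp [answerOuter]
        omega
      · have hklt : k < s.length := by omega
        rw [PySem.List.pyRange_one_cons (by omega)]
        simp only [answerOuter]
        rw [answerInner_drop s k cnt hklt]
        have hdrop : tot (s.drop k)
            = (s.drop (k+1)).countP (fun b => decide (b ≠ s[k])) + tot (s.drop (k+1)) := by
          rw [List.drop_eq_getElem_cons hklt]
          rfl
        set row := (s.drop (k+1)).countP (fun b => decide (b ≠ s[k])) with hrow
        by_cases h2 : (2:Int) ≤ cnt + (row : Int)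
        · rw [if_pos h2]
          symm
          rw [hdrop]
          simp only [decide_eq_true_eq]
          push_cast
          omega
        · rw [if_neg h2]
          have hcast : ((k : Int) + 1) = (((k+1 : Nat)) : Int) := by push_cast; ring
          rw [hcast, ih s (k+1) (cnt + (row : Int)) (by omega) (by omega), hdrop]
          simp only [decide_eq_decide]
          push_cast
          omega

theorem answer_eq_tot (string : String) :
    answer string = decide (2 ≤ (tot string.toList : Int)) := by
  have h := answerOuter_spec_aux string.toList.length string.toList 0 0 (by omega) (by omega)
  unfold answer
  simpa using h

theorem set_two_iff (s : List Char) :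
    2 ≤ (PySem.Set.ofList s).length ↔ ∃ a ∈ s, ∃ b ∈ s, a ≠ b := by
  have hnd : (PySem.Set.ofList s).Nodup := PySem.Set.nodup_ofList s
  have hmem : ∀ x : Char, x ∈ PySem.Set.ofList s ↔ x ∈ s := by
    intro x; exact PySem.Set.mem_ofList (xs := s) (y := x)
  rcases hl : PySem.Set.ofList s with _ | ⟨x, _ | ⟨y, r⟩⟩
  · constructor
    · intro h; simp at h
    · rintro ⟨a, ha, -⟩
      have := (hmem a).mpr ha
      rw [hl] at this
      simp at this
  · constructor
    · intro h; simp at h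
    · rintro ⟨a, ha, b, hb, hab⟩
      have ha' := (hmem a).mpr ha
      have hb' := (hmem b).mpr hb
      rw [hl] at ha' hb'
      simp at ha' hb'
      exact absurd (ha'.trans hb'.symm) hab
  · constructor
    · intro _
      rw [hl] at hnd
      have hxy : x ≠ y := by
        have := List.nodup_cons.mp hnd
        simp at this
        exact fun h => this.1.1 h
      refine ⟨x, (hmem x).mp ?_, y, (hmem y).mp ?_, hxy⟩ <;> rw [hl] <;> simp
    · intro _
      simp

-- ===== VERDICT (by name: the statement is the Claim_ definition above) =====
theorem answer_spec : Claim_equal_answer := by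
  intro string _
  unfold Spec_answer answer_alt
  rw [answer_eq_tot]
  simp only [PySem.Str.len_eq, PySem.Set.len, ← Bool.decide_and, decide_eq_decide]
  constructor
  · intro h
    have h2 : 2 ≤ tot string.toList := by exact_mod_cast h
    have hlen : 3 ≤ string.toList.length := by
      by_contra hc
      have := tot_lt_two_of_short string.toList (by omega)
      omega
    refine ⟨by simpa using (by exact_mod_cast hlen : (3:Int) ≤ (string.toList.length : Int)), ?_⟩
    have := (set_two_iff string.toList).mpr (exists_ne_of_tot_pos string.toList (by omega))
    exact_mod_cast this
  · rintro ⟨h3, hset⟩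
    have h3' : 3 ≤ string.toList.length := by
      have : (3:Int) ≤ (string.length : Int) := h3
      simpa using (by exact_mod_cast this : 3 ≤ string.length)
    have hset' : 2 ≤ (PySem.Set.ofList string.toList).length := by exact_mod_cast hset
    have := two_le_tot string.toList h3' ((set_two_iff string.toList).mp hset')
    exact_mod_cast this
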